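-- pv_equiv track=rewrite | github.com/wlkaqw/python | L062-02.py | shai1
-- ===== SOURCE A (Python) =====
-- def shai1(lst):
--     temp=[]
--     for i in lst:
--         i=set(i)
--         temp.extend(i)
--     st=set(temp)
--     dt={}
--     for i in st:
--         dt[i]=temp.count(i)
--     l2=sorted([k for k,v in dt.items() if v==2])
--     l3=sorted([k for k,v in dt.items() if v==3])
--     return[l2,l3]
-- ===== SOURCE B (Python) =====
-- def shai1(lst):
--     temp = []
--     for s in lst:
--         temp.extend(set(s))
--     temp.sort()
--     l2, l3 = [], []
--     i, n = 0, len(temp)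
--     while i < n:
--         j = i
--         while j < n and temp[j] == temp[i]:
--             j += 1
--         run = j - i
--         if run == 2:
--             l2.append(temp[i])
--         elif run == 3:
--             l3.append(temp[i])
--         i = j
--     return [l2, l3]
-- ===== Notes on version B (the rewrite author's own statement) =====
-- stated objective: alternative
-- what changed: B replaces A's count-dictionary over the flattened per-string-deduped characters with a single sort of that list followed by one run-length sweep that emits elements of runs of length 2 and 3 (already in sorted order, so no dict and no final sorts).
import Mathlib
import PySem

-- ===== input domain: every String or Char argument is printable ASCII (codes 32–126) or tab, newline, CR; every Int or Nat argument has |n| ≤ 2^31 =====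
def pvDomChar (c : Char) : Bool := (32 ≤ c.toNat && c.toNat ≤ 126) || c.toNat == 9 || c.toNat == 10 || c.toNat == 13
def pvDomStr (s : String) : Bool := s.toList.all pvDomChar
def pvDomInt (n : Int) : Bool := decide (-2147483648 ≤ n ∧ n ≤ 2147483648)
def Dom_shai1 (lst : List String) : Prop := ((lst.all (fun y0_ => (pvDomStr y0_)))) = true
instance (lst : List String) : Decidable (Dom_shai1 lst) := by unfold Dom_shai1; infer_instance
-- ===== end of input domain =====

-- B replaces A's count-dictionary with one sort of the per-string-deduped characters followed by a
-- single run-length sweep (objective: alternative decomposition, same asymptotic cost).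

-- ===== PORT A =====
def shai1 (lst : List String) : List (List String) :=
  let temp := lst.foldl
    (fun temp i => temp ++ PySem.Set.ofList (i.toList.map (fun c => String.singleton c))) []
  let st := PySem.Set.ofList temp
  let dt := st.foldl (fun d i => d.insert i (PySem.List.count temp i : Int)) PySem.Dict.empty
  let l2 := PySem.List.sorted ((dt.items.filter (fun kv => kv.2 == 2)).map (fun kv => kv.1))
    (fun x => x) false
  let l3 := PySem.List.sorted ((dt.items.filter (fun kv => kv.2 == 3)).map (fun kv => kv.1))
    (fun x => x) false
  [l2, l3]

-- ===== PORT B =====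
-- close a run of `run` copies of `x`
def pvFinishRun (x : String) (run : Nat) (l2 l3 : List String) : List String × List String :=
  if run = 2 then (l2 ++ [x], l3)
  else if run = 3 then (l2, l3 ++ [x])
  else (l2, l3)

-- Source B's sweep over the sorted list: current element x, current run length, accumulators
def pvScanRuns : List String → String → Nat → List String → List String →
    List String × List String
  | [], x, run, l2, l3 => pvFinishRun x run l2 l3
  | y :: ys, x, run, l2, l3 =>
    if y = x then pvScanRuns ys x (run + 1) l2 l3
    else
      let p := pvFinishRun x run l2 l3
      pvScanRuns ys y 1 p.1 p.2

def shai1_alt (lst : List String) : List (List String) :=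
  let temp := lst.foldl
    (fun temp i => temp ++ PySem.Set.ofList (i.toList.map (fun c => String.singleton c))) []
  match PySem.List.sorted temp (fun x => x) false with
  | [] => [[], []]
  | y :: ys =>
    let p := pvScanRuns ys y 1 [] []
    [p.1, p.2]

-- ===== PRECONDITION & SPEC =====
def Spec_shai1 (lst : List String) (out : List (List String)) : Prop := out = shai1_alt lst
instance (lst : List String) (out : List (List String)) : Decidable (Spec_shai1 lst out) := by
  unfold Spec_shai1; infer_instance

-- ===== CLAIM (what is proved, stated in full; the proofs are below) =====
def Claim_equal_shai1 : Prop := ∀ (lst : List String), Dom_shai1 lst → Spec_shai1 lst (shai1 lst)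

-- ===== LEMMAS AND PROOFS =====

-- Set.ofList builds a sublist of its input
theorem pv_foldl_add_sublist {α : Type} [DecidableEq α] (xs : List α) (s : List α) :
    ∃ t, xs.foldl PySem.Set.add s = s ++ t ∧ t.Sublist xs := by
  induction xs generalizing s with
  | nil => exact ⟨[], by simp⟩
  | cons x xs ih =>
    simp only [List.foldl_cons]
    obtain ⟨t, ht, hsub⟩ := ih (PySem.Set.add s x)
    by_cases hx : PySem.Set.contains s x = true
    · have hadd : PySem.Set.add s x = s := by unfold PySem.Set.add; rw [if_pos hx]
      refine ⟨t, ?_, hsub.cons x⟩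
      rw [hadd]; rwa [hadd] at ht
    · have hadd : PySem.Set.add s x = s ++ [x] := by unfold PySem.Set.add; rw [if_neg hx]
      refine ⟨x :: t, ?_, hsub.cons₂ x⟩
      rw [hadd]; rw [hadd] at ht
      simpa using ht

theorem pv_ofList_sublist {α : Type} [DecidableEq α] (xs : List α) :
    (PySem.Set.ofList xs).Sublist xs := by
  obtain ⟨t, ht, hsub⟩ := pv_foldl_add_sublist xs []
  rw [PySem.Set.ofList_eq_foldl, ht]; simpa using hsub

theorem pv_ofList_replicate (x : String) (r : Nat) (hr : 1 ≤ r) :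
    PySem.Set.ofList (List.replicate r x) = [x] := by
  obtain ⟨r, rfl⟩ : ∃ k, r = k + 1 := ⟨r - 1, by omega⟩
  clear hr
  induction r with
  | zero => rfl
  | succ n ih =>
    rw [show (n + 1 + 1) = (n + 1) + 1 from rfl, List.replicate_succ,
      PySem.Set.ofList_eq_foldl, List.foldl_cons]
    have : PySem.Set.add ([] : List String) x = [x] := rfl
    rw [this]
    have hstay : ∀ m, (List.replicate m x).foldl PySem.Set.add [x] = [x] := by
      intro m; induction m with
      | zero => rfl
      | succ k ihk =>
        rw [List.replicate_succ, List.foldl_cons,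
          show PySem.Set.add [x] x = [x] from by
            unfold PySem.Set.add; rw [if_pos ((PySem.Set.contains_iff [x] x).mpr (by simp))]]
        exact ihk
    exact hstay (n + 1)

theorem pv_dedup_replicate_append (x : String) (r : Nat) (l : List String)
    (hr : 1 ≤ r) (hx : x ∉ l) :
    PySem.List.dedup (List.replicate r x ++ l) = x :: PySem.List.dedup l := by
  have h1 : PySem.List.dedup (List.replicate r x ++ l)
      = PySem.Set.update (PySem.Set.ofList (List.replicate r x)) l := by
    simp [PySem.List.dedup_eq_ofList, PySem.Set.ofList_eq_foldl, PySem.Set.update,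
      List.foldl_append]
  rw [h1, pv_ofList_replicate x r hr, PySem.Set.update_eq_append_filter]
  have : (PySem.Set.ofList l).filter (fun y => !(PySem.Set.contains [x] y))
      = PySem.Set.ofList l := by
    apply List.filter_eq_self.mpr
    intro y hy
    have : y ∈ l := (PySem.Set.mem_ofList l y).mp hy
    have hne : y ≠ x := fun h => hx (h ▸ this)
    simp [hne]
  rw [this]; simp [PySem.List.dedup_eq_ofList]

-- the run sweep computes, for M = replicate r x ++ ys, the dedup-filtered count-2/count-3 lists
theorem pv_scan_spec (ys : List String) (x : String) (r : Nat) (l2 l3 : List String)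
    (hr : 1 ≤ r) (hs : (x :: ys).Pairwise (· ≤ ·)) :
    pvScanRuns ys x r l2 l3 =
      (l2 ++ (PySem.List.dedup (List.replicate r x ++ ys)).filter
          (fun z => (List.replicate r x ++ ys).count z == 2),
       l3 ++ (PySem.List.dedup (List.replicate r x ++ ys)).filter
          (fun z => (List.replicate r x ++ ys).count z == 3)) := by
  induction ys generalizing x r l2 l3 with
  | nil =>
    have hd : PySem.List.dedup (List.replicate r x ++ []) = [x] := by
      rw [pv_dedup_replicate_append x r [] hr (by simp)]; rfl
    have hfil : ∀ c : Nat,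
        List.filter (fun z => (List.replicate r x ++ []).count z == c) [x]
          = if r = c then [x] else [] := by
      intro c
      by_cases hrc : r = c <;>
        simp [List.count_replicate, hrc]
    simp only [pvScanRuns, hd, hfil]
    unfold pvFinishRun
    rcases eq_or_ne r 2 with h2 | h2
    · subst h2; simp
    · rcases eq_or_ne r 3 with h3 | h3
      · subst h3; simp [h2]
      · simp [h2, h3]
  | cons y ys ih =>
    by_cases hyx : y = x
    · subst hyx
      have heq : List.replicate r y ++ y :: ys = List.replicate (r + 1) y ++ ys := by
        rw [List.replicate_succ' (n := r)]; simp
      rw [show pvScanRuns (y :: ys) y r l2 l3 = pvScanRuns ys y (r + 1) l2 l3 from by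
        simp [pvScanRuns]]
      rw [ih y (r + 1) l2 l3 (by omega) (hs.sublist (by simp))]
      rw [heq]
    · -- y ≠ x : x does not occur in y :: ys
      have hxnot : x ∉ y :: ys := by
        intro hmem
        rcases List.mem_cons.mp hmem with h | h
        · exact hyx h.symm
        · have h1 : x ≤ y := (List.pairwise_cons.mp hs).1 y (by simp)
          have h2 : y ≤ x := (List.pairwise_cons.mp (hs.sublist (by simp))).1 x h
          exact hyx (le_antisymm h2 h1)
      have hd := pv_dedup_replicate_append x r (y :: ys) hr hxnot
      have hcount : ∀ z ∈ PySem.List.dedup (y :: ys),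
          (List.replicate r x ++ y :: ys).count z = (y :: ys).count z := by
        intro z hz
        have hzmem : z ∈ (y :: ys) := (PySem.List.mem_dedup (y :: ys) z).mp hz
        have hxz : x ≠ z := fun h => hxnot (h ▸ hzmem)
        rw [List.count_append]
        simp [List.count_replicate, hxz]
      have hcx : (List.replicate r x ++ y :: ys).count x = r := by
        rw [List.count_append]
        simp [List.count_eq_zero_of_not_mem hxnot]
      rw [show pvScanRuns (y :: ys) x r l2 l3
          = pvScanRuns ys y 1 (pvFinishRun x r l2 l3).1 (pvFinishRun x r l2 l3).2 from by
        simp [pvScanRuns, hyx]]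
      rw [ih y 1 _ _ (le_refl 1) (hs.sublist (by simp))]
      rw [hd]
      simp only [List.filter_cons, hcx]
      have hfilter2 : (PySem.List.dedup (y :: ys)).filter
            (fun z => (List.replicate r x ++ y :: ys).count z == 2)
          = (PySem.List.dedup (y :: ys)).filter
            (fun z => (List.replicate (1:Nat) y ++ ys).count z == 2) := by
        apply List.filter_congr; intro z hz
        rw [hcount z hz]; simp
      have hfilter3 : (PySem.List.dedup (y :: ys)).filter
            (fun z => (List.replicate r x ++ y :: ys).count z == 3)
          = (PySem.List.dedup (y :: ys)).filter
            (fun z => (List.replicate (1:Nat) y ++ ys).count z == 3) := by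
        apply List.filter_congr; intro z hz
        rw [hcount z hz]; simp
      have hrep1 : List.replicate (1:Nat) y ++ ys = y :: ys := by simp
      rw [hrep1] at hfilter2 hfilter3
      rw [hrep1, ← hfilter2, ← hfilter3]
      simp only [pvFinishRun]
      rcases eq_or_ne r 2 with h2 | h2
      · subst h2; simp
      · rcases eq_or_ne r 3 with h3 | h3
        · subst h3; simp [h2]
        · simp [h2, h3]

-- dedup of the sorted list IS sorted of the dedup
theorem pv_dedup_sorted (temp : List String) :
    PySem.List.dedup (PySem.List.sorted temp (fun x => x) false)
      = PySem.List.sorted (PySem.Set.ofList temp) (fun x => x) false := by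
  set s := PySem.List.sorted temp (fun x => x) false with hs
  have hperm : (PySem.List.dedup s).Perm (PySem.Set.ofList temp) := by
    apply (List.perm_ext_iff_of_nodup (PySem.List.nodup_dedup s)
      (PySem.Set.nodup_ofList temp)).mpr
    intro a
    rw [PySem.List.mem_dedup, PySem.Set.mem_ofList, hs, PySem.List.mem_sorted]
  have hle : (PySem.List.dedup s).Pairwise (· ≤ ·) := by
    have := PySem.List.sorted_pairwise temp (fun x : String => x)
    exact List.Pairwise.sublist
      (by simpa [PySem.List.dedup_eq_ofList] using pv_ofList_sublist s) this
  have hlt : (PySem.List.dedup s).Pairwise (· < ·) := by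
    have hne : (PySem.List.dedup s).Pairwise (· ≠ ·) := PySem.List.nodup_dedup s
    exact (hle.and hne).imp (fun h => lt_of_le_of_ne h.1 h.2)
  exact (PySem.List.sorted_eq_of_perm_of_pairwise_lt _ _ _ hperm hlt).symm

theorem shai1_eq (lst : List String) : shai1 lst = shai1_alt lst := by
  unfold shai1 shai1_alt
  set temp := lst.foldl
    (fun temp i => temp ++ PySem.Set.ofList (i.toList.map (fun c => String.singleton c))) []
    with htemp
  clear_value temp
  clear htemp
  -- A side: dict items
  have hitems : ((PySem.Set.ofList temp).foldl
      (fun d i => d.insert i (PySem.List.count temp i : Int)) PySem.Dict.empty).items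
      = (PySem.Set.ofList temp).map (fun k => (k, (PySem.List.count temp k : Int))) := by
    have := PySem.Dict.items_foldl_insert_fresh (PySem.Set.ofList temp) (fun i => i)
      (fun i => (PySem.List.count temp i : Int)) PySem.Dict.empty
      (by intro a _; simp)
      (by simp only [List.map_id_fun']
          exact PySem.Set.nodup_ofList temp)
    simp at this
    exact this
  simp only [hitems]
  -- A side l2/l3 as filters over st
  have hAside : ∀ c : Int,
      (((PySem.Set.ofList temp).map
          (fun k => (k, (PySem.List.count temp k : Int)))).filter
        (fun kv => kv.2 == c)).map (fun kv => kv.1)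
      = (PySem.Set.ofList temp).filter (fun k => (PySem.List.count temp k : Int) == c) := by
    intro c
    rw [List.filter_map, List.map_map]
    simp [Function.comp_def]
  rw [hAside 2, hAside 3]
  -- B side
  rcases hsplit : PySem.List.sorted temp (fun x => x) false with _ | ⟨y, ys⟩
  · -- temp empty
    have h0 : temp = [] := (PySem.List.sorted_eq_nil_iff temp (fun x => x) false).mp hsplit
    subst h0
    rfl
  · have hpw : (y :: ys).Pairwise (· ≤ ·) := by
      have := PySem.List.sorted_pairwise temp (fun x : String => x)
      rwa [hsplit] at this
    show _ = [(pvScanRuns ys y 1 [] []).1, (pvScanRuns ys y 1 [] []).2]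
    rw [pv_scan_spec ys y 1 [] [] (le_refl 1) hpw]
    have hrep1 : List.replicate (1:Nat) y ++ ys = y :: ys := by simp
    rw [hrep1]
    rw [← hsplit]
    set s := PySem.List.sorted temp (fun x => x) false with hsdef
    have hcnt : ∀ z, s.count z = temp.count z := by
      intro z
      exact (PySem.List.sorted_perm temp (fun x => x) false).count_eq z
    have hfix : ∀ c : Nat, (PySem.List.dedup s).filter (fun z => s.count z == c)
        = (PySem.List.dedup s).filter (fun z => temp.count z == c) := by
      intro c; apply List.filter_congr; intro z _; rw [hcnt z]
    rw [hfix 2, hfix 3, pv_dedup_sorted temp]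
    have hB : ∀ c : Nat,
        (PySem.List.sorted (PySem.Set.ofList temp) (fun x => x) false).filter
          (fun z => temp.count z == c)
        = PySem.List.sorted
            ((PySem.Set.ofList temp).filter (fun k => (PySem.List.count temp k : Int) == c))
            (fun x => x) false := by
      intro c
      apply Eq.symm
      apply PySem.List.sorted_eq_of_perm_of_pairwise_lt _ _ _
      · have hpredx : (PySem.Set.ofList temp).filter
            (fun k => ((PySem.List.count temp k : Int) == (c : Int)))
            = (PySem.Set.ofList temp).filter (fun z => List.count z temp == c) :=
          List.filter_congr (fun z _ => by simp [PySem.List.count_eq])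
        rw [hpredx]
        exact (PySem.List.sorted_perm (PySem.Set.ofList temp) (fun x => x) false).filter _
      · exact List.Pairwise.filter _ (PySem.List.sorted_ofList_pairwise_lt temp)
    rw [hB 2, hB 3]
    norm_num

-- ===== VERDICT (by name: the statement is the Claim_ definition above) =====
theorem shai1_spec : Claim_equal_shai1 := by
  intro lst _
  unfold Spec_shai1
  exact shai1_eq lst
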